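-- pv_equiv track=rewrite | github.com/BUhdh951018/CS677 | Assignment/Assignment2_donghangHe_113/question1/Question1.2-4_HSBC.py | search_change
-- ===== SOURCE A (Python) =====
-- def search_change(sub_data, label):
--     # a int list for calculate the three situation
--     k_days = [0, 0, 0]
--     # int variable for counting the "up" days
--     count = 0
--     for row in sub_data:
--
--         if row[14] == label:
--             count += 1
--             continue
--         else:
--             if count == 1:
--                 k_days[count - 1] += 1
--                 count = 0
--             elif count == 2:
--                 k_days[count - 1] += 1
--                 count = 0
--             elif count == 3:
--                 k_days[count - 1] += 1
--                 count = 0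
--             else:
--                 count = 0
--                 continue
--     return k_days
-- ===== SOURCE B (Python) =====
-- def _terminated_runs(ms):
--     # lengths of the maximal True-runs that are terminated by a False;
--     # a trailing run (ending at the end of the list) is never terminated
--     runs, i, n = [], 0, len(ms)
--     while i < n:
--         j = i
--         while j < n and ms[j]:
--             j += 1
--         if j == n:
--             break
--         if j > i:
--             runs.append(j - i)
--         i = j + 1
--     return runs
--
--
-- def search_change(sub_data, label):
--     matches = [row[14] == label for row in sub_data]
--     runs = _terminated_runs(matches)
--     return [runs.count(1), runs.count(2), runs.count(3)]
-- ===== Notes on version B (the rewrite author's own statement) =====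
-- stated objective: alternative
-- what changed: B separates the problem into phases: map rows to a boolean match column, extract the lengths of mismatch-terminated runs with a two-pointer scan, and obtain the answer as [runs.count(1), runs.count(2), runs.count(3)], instead of A's single fold over a mutable counter with a four-way branch that buckets in place.
import Mathlib
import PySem

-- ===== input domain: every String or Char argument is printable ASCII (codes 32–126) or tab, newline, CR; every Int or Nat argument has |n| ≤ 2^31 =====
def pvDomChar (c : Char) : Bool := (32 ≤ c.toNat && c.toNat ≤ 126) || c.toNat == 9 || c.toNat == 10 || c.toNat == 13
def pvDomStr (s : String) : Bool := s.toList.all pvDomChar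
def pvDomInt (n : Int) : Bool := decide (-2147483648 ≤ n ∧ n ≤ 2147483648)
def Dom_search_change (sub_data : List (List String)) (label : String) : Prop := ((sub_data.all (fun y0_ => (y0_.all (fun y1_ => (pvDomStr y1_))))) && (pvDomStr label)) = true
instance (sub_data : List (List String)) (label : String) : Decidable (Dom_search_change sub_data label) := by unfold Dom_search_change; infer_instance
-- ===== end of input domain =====

-- B re-decomposes A's single stateful loop into phases: boolean match column -> lengths of
-- mismatch-terminated runs -> count runs of length 1/2/3 (alternative decomposition, same cost).
-- ===== PORT A =====
-- one loop iteration of A: `row[14] == label` keeps counting, a mismatch buckets count ∈ {1,2,3}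
def pvStepA (label : String) (st : List Int × Int) (row : List String) : List Int × Int :=
  if (PySem.List.pyGet? row 14).getD "" = label then (st.1, st.2 + 1)
  else if st.2 = 1 then (st.1.modify 0 (· + 1), 0)
  else if st.2 = 2 then (st.1.modify 1 (· + 1), 0)
  else if st.2 = 3 then (st.1.modify 2 (· + 1), 0)
  else (st.1, 0)

def search_change (sub_data : List (List String)) (label : String) : List Int :=
  (sub_data.foldl (pvStepA label) ([0, 0, 0], 0)).1

-- ===== PORT B =====
-- B's _terminated_runs: the inner `while ms[j]` advance is the takeWhile prefix, the outer
-- while-loop step `i = j + 1` is the recursive call on the elements after that mismatch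
def pvTermRuns (ms : List Bool) : List Nat :=
  if hms : ms = [] then []
  else
    let run := (ms.takeWhile (· = true)).length
    if run = ms.length then []
    else
      let rest := pvTermRuns (ms.drop (run + 1))
      if run > 0 then run :: rest else rest
termination_by ms.length
decreasing_by
  have := List.length_pos_iff.mpr hms
  simp [List.length_drop]; omega

def search_change_alt (sub_data : List (List String)) (label : String) : List Int :=
  let ms := sub_data.map (fun row => decide ((PySem.List.pyGet? row 14).getD "" = label))
  let runs := pvTermRuns ms
  [(runs.count 1 : Int), (runs.count 2 : Int), (runs.count 3 : Int)]

-- ===== PRECONDITION & SPEC =====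
-- Pre_ excludes exactly the inputs where Python A raises IndexError: a row with fewer than 15 entries.
def Pre_search_change (sub_data : List (List String)) (label : String) : Prop :=
  ∀ row ∈ sub_data, 15 ≤ row.length
instance (sub_data : List (List String)) (label : String) : Decidable (Pre_search_change sub_data label) := by unfold Pre_search_change; infer_instance

def pvWitness_search_change : List (List String) × String :=
  ([["a","b","c","d","e","f","g","h","i","j","k","l","m","n","u"],
    ["a","b","c","d","e","f","g","h","i","j","k","l","m","n","d"]], "u")

def Spec_search_change (sub_data : List (List String)) (label : String) (out : List Int) : Prop := out = search_change_alt sub_data label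
instance (sub_data : List (List String)) (label : String) (out : List Int) : Decidable (Spec_search_change sub_data label out) := by unfold Spec_search_change; infer_instance

-- ===== CLAIM (what is proved, stated in full; the proofs are below) =====
def Claim_equal_search_change : Prop := ∀ (sub_data : List (List String)) (label : String), Dom_search_change sub_data label → Pre_search_change sub_data label → Spec_search_change sub_data label (search_change sub_data label)

-- ===== LEMMAS AND PROOFS =====

-- A's step seen on the boolean match column
def pvStepB (st : List Int × Int) (m : Bool) : List Int × Int :=
  if m then (st.1, st.2 + 1)
  else if st.2 = 1 then (st.1.modify 0 (· + 1), 0)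
  else if st.2 = 2 then (st.1.modify 1 (· + 1), 0)
  else if st.2 = 3 then (st.1.modify 2 (· + 1), 0)
  else (st.1, 0)

theorem pvStepA_eq (label : String) (st : List Int × Int) (row : List String) :
    pvStepA label st row = pvStepB st (decide ((PySem.List.pyGet? row 14).getD "" = label)) := by
  simp [pvStepA, pvStepB]

theorem pvTermRuns_replicate (n : Nat) : pvTermRuns (List.replicate n true) = [] := by
  unfold pvTermRuns
  cases n with
  | zero => simp
  | succ m => simp

theorem pvTermRuns_replicate_false (n : Nat) (t : List Bool) :
    pvTermRuns (List.replicate n true ++ false :: t) =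
      (if n > 0 then [n] else []) ++ pvTermRuns t := by
  have htake : (List.replicate n true ++ false :: t).takeWhile (· = true) = List.replicate n true := by
    induction n with
    | zero => simp
    | succ m ih => simp [List.replicate_succ]
  have hdrop : (List.replicate n true ++ false :: t).drop (n + 1) = t := by
    induction n with
    | zero => simp
    | succ m ih => simpa [List.replicate_succ] using ih
  rw [pvTermRuns]
  simp only [htake, hdrop, List.length_replicate, List.length_append, List.length_cons,
    List.length_replicate]
  have hne : (List.replicate n true ++ false :: t) ≠ [] := by simp
  rw [dif_neg hne, if_neg (by omega)]
  by_cases hn : n > 0 <;> simp [hn]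

-- main invariant: folding A's step from count n equals the run-counts of (replicate n true ++ ms)
theorem pv_main (ms : List Bool) : ∀ (a b c : Int) (n : Nat),
    (ms.foldl pvStepB ([a, b, c], (n : Int))).1 =
      [a + ((pvTermRuns (List.replicate n true ++ ms)).count 1 : Int),
       b + ((pvTermRuns (List.replicate n true ++ ms)).count 2 : Int),
       c + ((pvTermRuns (List.replicate n true ++ ms)).count 3 : Int)] := by
  induction ms with
  | nil =>
    intro a b c n
    simp [pvTermRuns_replicate]
  | cons m t ih =>
    intro a b c n
    cases m with
    | true =>
      have harr : List.replicate n true ++ true :: t = List.replicate (n + 1) true ++ t := by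
        rw [List.replicate_succ']; simp
      have hst : pvStepB ([a, b, c], (n : Int)) true = ([a, b, c], ((n + 1 : Nat) : Int)) := by
        simp [pvStepB]
      rw [List.foldl_cons, hst, ih, harr]
    | false =>
      rw [List.foldl_cons, pvTermRuns_replicate_false]
      match n with
      | 0 =>
        have hst : pvStepB ([a, b, c], ((0 : Nat) : Int)) false = ([a, b, c], ((0 : Nat) : Int)) := by
          simp [pvStepB]
        rw [hst, ih]; simp
      | 1 =>
        have hst : pvStepB ([a, b, c], ((1 : Nat) : Int)) false = ([a + 1, b, c], ((0 : Nat) : Int)) := by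
          simp [pvStepB, List.modify]
        rw [hst, ih]
        simp; omega
      | 2 =>
        have hst : pvStepB ([a, b, c], ((2 : Nat) : Int)) false = ([a, b + 1, c], ((0 : Nat) : Int)) := by
          simp [pvStepB, List.modify]
        rw [hst, ih]
        simp; omega
      | 3 =>
        have hst : pvStepB ([a, b, c], ((3 : Nat) : Int)) false = ([a, b, c + 1], ((0 : Nat) : Int)) := by
          simp [pvStepB, List.modify]
        rw [hst, ih]
        simp; omega
      | (k + 4) =>
        have hst : pvStepB ([a, b, c], ((k + 4 : Nat) : Int)) false = ([a, b, c], ((0 : Nat) : Int)) := by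
          simp only [pvStepB, Bool.false_eq_true, if_false, Nat.cast_add, Nat.cast_ofNat,
            Nat.cast_zero]
          split_ifs <;> first | rfl | omega
        rw [hst, ih]
        have e1 : (k + 4 : Nat) ≠ 1 := by omega
        have e2 : (k + 4 : Nat) ≠ 2 := by omega
        have e3 : (k + 4 : Nat) ≠ 3 := by omega
        simp [e1, e2, e3]

-- ===== VERDICT (by name: the statement is the Claim_ definition above) =====
theorem search_change_spec : Claim_equal_search_change := by
  intro sub_data label _ _
  unfold Spec_search_change search_change search_change_alt
  have hfold : ∀ (l : List (List String)) (st : List Int × Int),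
      l.foldl (pvStepA label) st =
        (l.map (fun row => decide ((PySem.List.pyGet? row 14).getD "" = label))).foldl pvStepB st := by
    intro l
    induction l with
    | nil => intro st; rfl
    | cons r t ih => intro st; simp only [List.foldl_cons, List.map_cons, pvStepA_eq]; exact ih _
  rw [hfold]
  have := pv_main (sub_data.map (fun row => decide ((PySem.List.pyGet? row 14).getD "" = label)))
    0 0 0 0
  simpa using this
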